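-- pv_equiv track=rewrite | github.com/Stokn9x/ProStatica | src/Server/API/Analysis.py | player_analysis_frequency
-- ===== SOURCE A (Python) =====
-- def player_analysis_frequency(stats):
--
--     frequency = {
--         "0-5": 0,
--         "5-10": 0,
--         "10-15": 0,
--         "15-20": 0,
--         "20-25": 0,
--         "25-30":0,
--         "30+":0
--     }
--
--     for stat in stats:
--         if stat >= 30:
--             frequency["30+"] += 1
--         elif stat >= 25:
--             frequency["25-30"] += 1
--         elif stat >= 20:
--             frequency["20-25"] += 1
--         elif stat >= 15:
--             frequency["15-20"] += 1
--         elif stat >= 10: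
--             frequency["10-15"] += 1
--         elif stat >= 5:
--             frequency["5-10"] += 1
--         else:
--             frequency["0-5"] += 1
--
--     return frequency
-- ===== SOURCE B (Python) =====
-- def player_analysis_frequency(stats):
--     keys = ["0-5", "5-10", "10-15", "15-20", "20-25", "25-30", "30+"]
--     geq = [sum(1 for s in stats if s >= t) for t in (5, 10, 15, 20, 25, 30)]
--     counts = [len(stats) - geq[0]] + [geq[i] - geq[i + 1] for i in range(5)] + [geq[5]]
--     return dict(zip(keys, counts))
-- ===== Notes on version B (the rewrite author's own statement) =====
-- stated objective: alternative
-- what changed: Instead of a single pass with a seven-way if/elif cascade, B makes staged passes counting how many stats are at or above each threshold (5..30) and derives each bucket's frequency as the difference of adjacent cumulative counts.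
import Mathlib
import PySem

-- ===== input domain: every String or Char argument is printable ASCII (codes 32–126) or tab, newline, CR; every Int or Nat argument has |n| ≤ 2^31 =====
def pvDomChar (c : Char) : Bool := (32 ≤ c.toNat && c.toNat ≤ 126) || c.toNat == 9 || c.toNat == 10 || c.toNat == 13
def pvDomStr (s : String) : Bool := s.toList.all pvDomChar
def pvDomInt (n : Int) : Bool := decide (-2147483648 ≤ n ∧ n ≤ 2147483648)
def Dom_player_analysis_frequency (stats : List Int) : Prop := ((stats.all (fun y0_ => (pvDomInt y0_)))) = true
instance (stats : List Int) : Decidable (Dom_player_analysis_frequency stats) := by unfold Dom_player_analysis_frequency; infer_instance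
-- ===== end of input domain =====

-- B replaces A's single pass with a seven-way if/elif cascade by staged counting:
-- it counts, for each threshold t in (5..30), how many stats are ≥ t, and obtains each
-- bucket's frequency as a difference of adjacent cumulative counts; objective: alternative.

-- ===== PORT A =====
-- the initial literal dict of A
def pvFreqA : PySem.Dict String Int :=
  ((((((PySem.Dict.empty.insert "0-5" 0).insert "5-10" 0).insert "10-15" 0).insert
      "15-20" 0).insert "20-25" 0).insert "25-30" 0).insert "30+" 0

-- the body of A's for-loop (frequency[k] += 1; all seven keys are present, so modify _ 0 is exact)
def pvStepA (d : PySem.Dict String Int) (stat : Int) : PySem.Dict String Int :=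
  if stat ≥ 30 then d.modify "30+" 0 (· + 1)
  else if stat ≥ 25 then d.modify "25-30" 0 (· + 1)
  else if stat ≥ 20 then d.modify "20-25" 0 (· + 1)
  else if stat ≥ 15 then d.modify "15-20" 0 (· + 1)
  else if stat ≥ 10 then d.modify "10-15" 0 (· + 1)
  else if stat ≥ 5 then d.modify "5-10" 0 (· + 1)
  else d.modify "0-5" 0 (· + 1)

def player_analysis_frequency (stats : List Int) : List (String × Int) :=
  (stats.foldl pvStepA pvFreqA).items

-- ===== PORT B =====
-- sum(1 for s in stats if s >= t)
def pvGeq (stats : List Int) (t : Int) : Int :=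
  ((stats.filter (fun s => s ≥ t)).map (fun _ => (1 : Int))).sum

def player_analysis_frequency_alt (stats : List Int) : List (String × Int) :=
  let keys := ["0-5", "5-10", "10-15", "15-20", "20-25", "25-30", "30+"]
  let geq := [(5 : Int), 10, 15, 20, 25, 30].map (pvGeq stats)
  let counts := [(stats.length : Int) - PySem.List.pyGetD geq 0 0] ++
    ((PySem.List.pyRange 0 5 1).map
      (fun i => PySem.List.pyGetD geq i 0 - PySem.List.pyGetD geq (i + 1) 0)) ++
    [PySem.List.pyGetD geq 5 0]
  ((keys.zip counts).foldl (fun d kv => d.insert kv.1 kv.2) PySem.Dict.empty).items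

-- ===== PRECONDITION & SPEC =====
def Spec_player_analysis_frequency (stats : List Int) (out : List (String × Int)) : Prop := out = player_analysis_frequency_alt stats
instance (stats : List Int) (out : List (String × Int)) : Decidable (Spec_player_analysis_frequency stats out) := by unfold Spec_player_analysis_frequency; infer_instance

-- ===== CLAIM (what is proved, stated in full; the proofs are below) =====
def Claim_equal_player_analysis_frequency : Prop := ∀ (stats : List Int), Dom_player_analysis_frequency stats → Spec_player_analysis_frequency stats (player_analysis_frequency stats)

-- ===== LEMMAS AND PROOFS =====

-- explicit seven-value dict with A's key layout
def pvD (a b c d e f g : Int) : PySem.Dict String Int :=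
  ((((((PySem.Dict.empty.insert "0-5" a).insert "5-10" b).insert "10-15" c).insert
      "15-20" d).insert "20-25" e).insert "25-30" f).insert "30+" g

theorem pvStepA_pvD (a b c d e f g x : Int) :
    pvStepA (pvD a b c d e f g) x =
      pvD (a + if x < 5 then 1 else 0) (b + if 5 ≤ x ∧ x < 10 then 1 else 0)
          (c + if 10 ≤ x ∧ x < 15 then 1 else 0) (d + if 15 ≤ x ∧ x < 20 then 1 else 0)
          (e + if 20 ≤ x ∧ x < 25 then 1 else 0) (f + if 25 ≤ x ∧ x < 30 then 1 else 0)
          (g + if 30 ≤ x then 1 else 0) := by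
  unfold pvStepA
  by_cases h1 : x ≥ 30
  · simp only [if_pos h1]
    have e0 : (if x < 5 then (1:Int) else 0) = 0 := if_neg (by omega)
    have e1 : (if 5 ≤ x ∧ x < 10 then (1:Int) else 0) = 0 := if_neg (by omega)
    have e2 : (if 10 ≤ x ∧ x < 15 then (1:Int) else 0) = 0 := if_neg (by omega)
    have e3 : (if 15 ≤ x ∧ x < 20 then (1:Int) else 0) = 0 := if_neg (by omega)
    have e4 : (if 20 ≤ x ∧ x < 25 then (1:Int) else 0) = 0 := if_neg (by omega)
    have e5 : (if 25 ≤ x ∧ x < 30 then (1:Int) else 0) = 0 := if_neg (by omega)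
    simp only [e0, e1, e2, e3, e4, e5, add_zero]
    apply PySem.Dict.ext
    simp [pvD, PySem.Dict.modify, PySem.Dict.getD_insert, PySem.Dict.items_insert,
      PySem.Dict.contains_insert, PySem.Dict.empty]
  by_cases h2 : x ≥ 25
  · simp only [if_neg h1, if_pos h2]
    have e0 : (if x < 5 then (1:Int) else 0) = 0 := if_neg (by omega)
    have e1 : (if 5 ≤ x ∧ x < 10 then (1:Int) else 0) = 0 := if_neg (by omega)
    have e2 : (if 10 ≤ x ∧ x < 15 then (1:Int) else 0) = 0 := if_neg (by omega)
    have e3 : (if 15 ≤ x ∧ x < 20 then (1:Int) else 0) = 0 := if_neg (by omega)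
    have e4 : (if 20 ≤ x ∧ x < 25 then (1:Int) else 0) = 0 := if_neg (by omega)
    have e5 : (if 25 ≤ x ∧ x < 30 then (1:Int) else 0) = 1 := if_pos (by omega)
    simp only [e0, e1, e2, e3, e4, e5, add_zero]
    apply PySem.Dict.ext
    simp [pvD, PySem.Dict.modify, PySem.Dict.getD_insert, PySem.Dict.items_insert,
      PySem.Dict.contains_insert, PySem.Dict.empty]
  by_cases h3 : x ≥ 20
  · simp only [if_neg h1, if_neg h2, if_pos h3]
    have e0 : (if x < 5 then (1:Int) else 0) = 0 := if_neg (by omega)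
    have e1 : (if 5 ≤ x ∧ x < 10 then (1:Int) else 0) = 0 := if_neg (by omega)
    have e2 : (if 10 ≤ x ∧ x < 15 then (1:Int) else 0) = 0 := if_neg (by omega)
    have e3 : (if 15 ≤ x ∧ x < 20 then (1:Int) else 0) = 0 := if_neg (by omega)
    have e4 : (if 20 ≤ x ∧ x < 25 then (1:Int) else 0) = 1 := if_pos (by omega)
    have e5 : (if 25 ≤ x ∧ x < 30 then (1:Int) else 0) = 0 := if_neg (by omega)
    simp only [e0, e1, e2, e3, e4, e5, add_zero]
    apply PySem.Dict.ext
    simp [pvD, PySem.Dict.modify, PySem.Dict.getD_insert, PySem.Dict.items_insert,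
      PySem.Dict.contains_insert, PySem.Dict.empty]
  by_cases h4 : x ≥ 15
  · simp only [if_neg h1, if_neg h2, if_neg h3, if_pos h4]
    have e0 : (if x < 5 then (1:Int) else 0) = 0 := if_neg (by omega)
    have e1 : (if 5 ≤ x ∧ x < 10 then (1:Int) else 0) = 0 := if_neg (by omega)
    have e2 : (if 10 ≤ x ∧ x < 15 then (1:Int) else 0) = 0 := if_neg (by omega)
    have e3 : (if 15 ≤ x ∧ x < 20 then (1:Int) else 0) = 1 := if_pos (by omega)
    have e4 : (if 20 ≤ x ∧ x < 25 then (1:Int) else 0) = 0 := if_neg (by omega)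
    have e5 : (if 25 ≤ x ∧ x < 30 then (1:Int) else 0) = 0 := if_neg (by omega)
    simp only [e0, e1, e2, e3, e4, e5, add_zero]
    apply PySem.Dict.ext
    simp [pvD, PySem.Dict.modify, PySem.Dict.getD_insert, PySem.Dict.items_insert,
      PySem.Dict.contains_insert, PySem.Dict.empty]
  by_cases h5 : x ≥ 10
  · simp only [if_neg h1, if_neg h2, if_neg h3, if_neg h4, if_pos h5]
    have e0 : (if x < 5 then (1:Int) else 0) = 0 := if_neg (by omega)
    have e1 : (if 5 ≤ x ∧ x < 10 then (1:Int) else 0) = 0 := if_neg (by omega)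
    have e2 : (if 10 ≤ x ∧ x < 15 then (1:Int) else 0) = 1 := if_pos (by omega)
    have e3 : (if 15 ≤ x ∧ x < 20 then (1:Int) else 0) = 0 := if_neg (by omega)
    have e4 : (if 20 ≤ x ∧ x < 25 then (1:Int) else 0) = 0 := if_neg (by omega)
    have e5 : (if 25 ≤ x ∧ x < 30 then (1:Int) else 0) = 0 := if_neg (by omega)
    simp only [e0, e1, e2, e3, e4, e5, add_zero]
    apply PySem.Dict.ext
    simp [pvD, PySem.Dict.modify, PySem.Dict.getD_insert, PySem.Dict.items_insert,
      PySem.Dict.contains_insert, PySem.Dict.empty]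
  by_cases h6 : x ≥ 5
  · simp only [if_neg h1, if_neg h2, if_neg h3, if_neg h4, if_neg h5, if_pos h6]
    have e0 : (if x < 5 then (1:Int) else 0) = 0 := if_neg (by omega)
    have e1 : (if 5 ≤ x ∧ x < 10 then (1:Int) else 0) = 1 := if_pos (by omega)
    have e2 : (if 10 ≤ x ∧ x < 15 then (1:Int) else 0) = 0 := if_neg (by omega)
    have e3 : (if 15 ≤ x ∧ x < 20 then (1:Int) else 0) = 0 := if_neg (by omega)
    have e4 : (if 20 ≤ x ∧ x < 25 then (1:Int) else 0) = 0 := if_neg (by omega)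
    have e5 : (if 25 ≤ x ∧ x < 30 then (1:Int) else 0) = 0 := if_neg (by omega)
    simp only [e0, e1, e2, e3, e4, e5, add_zero]
    apply PySem.Dict.ext
    simp [pvD, PySem.Dict.modify, PySem.Dict.getD_insert, PySem.Dict.items_insert,
      PySem.Dict.contains_insert, PySem.Dict.empty]
  simp only [if_neg h1, if_neg h2, if_neg h3, if_neg h4, if_neg h5, if_neg h6]
  have e0 : (if x < 5 then (1:Int) else 0) = 1 := if_pos (by omega)
  have e1 : (if 5 ≤ x ∧ x < 10 then (1:Int) else 0) = 0 := if_neg (by omega)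
  have e2 : (if 10 ≤ x ∧ x < 15 then (1:Int) else 0) = 0 := if_neg (by omega)
  have e3 : (if 15 ≤ x ∧ x < 20 then (1:Int) else 0) = 0 := if_neg (by omega)
  have e4 : (if 20 ≤ x ∧ x < 25 then (1:Int) else 0) = 0 := if_neg (by omega)
  have e5 : (if 25 ≤ x ∧ x < 30 then (1:Int) else 0) = 0 := if_neg (by omega)
  simp only [e0, e1, e2, e3, e4, e5, add_zero]
  apply PySem.Dict.ext
  simp [pvD, PySem.Dict.modify, PySem.Dict.getD_insert, PySem.Dict.items_insert,
    PySem.Dict.contains_insert, PySem.Dict.empty]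

theorem pvFoldA_pvD (l : List Int) (a b c d e f g : Int) :
    l.foldl pvStepA (pvD a b c d e f g) =
      pvD (a + (l.countP (fun s => decide (s < 5)) : Int))
          (b + (l.countP (fun s => decide (5 ≤ s ∧ s < 10)) : Int))
          (c + (l.countP (fun s => decide (10 ≤ s ∧ s < 15)) : Int))
          (d + (l.countP (fun s => decide (15 ≤ s ∧ s < 20)) : Int))
          (e + (l.countP (fun s => decide (20 ≤ s ∧ s < 25)) : Int))
          (f + (l.countP (fun s => decide (25 ≤ s ∧ s < 30)) : Int))
          (g + (l.countP (fun s => decide (30 ≤ s)) : Int)) := by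
  induction l generalizing a b c d e f g with
  | nil => simp
  | cons x xs ih =>
    rw [List.foldl_cons, pvStepA_pvD, ih]
    simp only [List.countP_cons, decide_eq_true_eq]
    have k0 : ∀ (w : Int) (n : Nat), w + (if x < 5 then (1:Int) else 0) + (n : Int) = w + ((n + if x < 5 then 1 else 0 : Nat) : Int) := by
      intro w n; split_ifs <;> push_cast <;> omega
    have k1 : ∀ (w : Int) (n : Nat), w + (if 5 ≤ x ∧ x < 10 then (1:Int) else 0) + (n : Int) = w + ((n + if 5 ≤ x ∧ x < 10 then 1 else 0 : Nat) : Int) := by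
      intro w n; split_ifs <;> push_cast <;> omega
    have k2 : ∀ (w : Int) (n : Nat), w + (if 10 ≤ x ∧ x < 15 then (1:Int) else 0) + (n : Int) = w + ((n + if 10 ≤ x ∧ x < 15 then 1 else 0 : Nat) : Int) := by
      intro w n; split_ifs <;> push_cast <;> omega
    have k3 : ∀ (w : Int) (n : Nat), w + (if 15 ≤ x ∧ x < 20 then (1:Int) else 0) + (n : Int) = w + ((n + if 15 ≤ x ∧ x < 20 then 1 else 0 : Nat) : Int) := by
      intro w n; split_ifs <;> push_cast <;> omega
    have k4 : ∀ (w : Int) (n : Nat), w + (if 20 ≤ x ∧ x < 25 then (1:Int) else 0) + (n : Int) = w + ((n + if 20 ≤ x ∧ x < 25 then 1 else 0 : Nat) : Int) := by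
      intro w n; split_ifs <;> push_cast <;> omega
    have k5 : ∀ (w : Int) (n : Nat), w + (if 25 ≤ x ∧ x < 30 then (1:Int) else 0) + (n : Int) = w + ((n + if 25 ≤ x ∧ x < 30 then 1 else 0 : Nat) : Int) := by
      intro w n; split_ifs <;> push_cast <;> omega
    have k6 : ∀ (w : Int) (n : Nat), w + (if 30 ≤ x then (1:Int) else 0) + (n : Int) = w + ((n + if 30 ≤ x then 1 else 0 : Nat) : Int) := by
      intro w n; split_ifs <;> push_cast <;> omega
    rw [k0 a, k1 b, k2 c, k3 d, k4 e, k5 f, k6 g]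

-- cumulative count splits at a higher threshold
theorem pvCountP_split (l : List Int) (t u : Int) (h : t ≤ u) :
    l.countP (fun s => decide (t ≤ s)) =
      l.countP (fun s => decide (t ≤ s ∧ s < u)) + l.countP (fun s => decide (u ≤ s)) := by
  induction l with
  | nil => simp
  | cons x xs ih =>
    simp only [List.countP_cons, decide_eq_true_eq, ih]
    split_ifs <;> omega

-- the staged pass counts exactly the stats at or above the threshold
theorem pvGeq_eq (l : List Int) (t : Int) :
    pvGeq l t = (l.countP (fun s => decide (t ≤ s)) : Int) := by
  unfold pvGeq
  induction l with
  | nil => simp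
  | cons x xs ih =>
    simp only [List.filter_cons, List.countP_cons, decide_eq_true_eq]
    split_ifs with h
    · simp only [List.map_cons, List.sum_cons, ih]; push_cast; omega
    · simp only [ih]; push_cast; omega

-- B's output, written out
theorem pvAltItems (stats : List Int) : player_analysis_frequency_alt stats =
    [("0-5", (stats.length : Int) - pvGeq stats 5), ("5-10", pvGeq stats 5 - pvGeq stats 10),
     ("10-15", pvGeq stats 10 - pvGeq stats 15), ("15-20", pvGeq stats 15 - pvGeq stats 20),
     ("20-25", pvGeq stats 20 - pvGeq stats 25), ("25-30", pvGeq stats 25 - pvGeq stats 30),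
     ("30+", pvGeq stats 30)] := by rfl

-- the item list of the seven-value dict
theorem pvD_items (a b c d e f g : Int) : (pvD a b c d e f g).items =
    [("0-5", a), ("5-10", b), ("10-15", c), ("15-20", d), ("20-25", e), ("25-30", f), ("30+", g)] := by rfl

-- below-5 count is the complement of the at-least-5 count
theorem pvCountP_lt_five (l : List Int) :
    l.countP (fun s => decide (s < 5)) = l.length - l.countP (fun s => decide ((5:Int) ≤ s)) ∧
    l.countP (fun s => decide ((5:Int) ≤ s)) ≤ l.length := by
  induction l with
  | nil => simp
  | cons x xs ih =>
    simp only [List.countP_cons, decide_eq_true_eq, List.length_cons]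
    split_ifs <;> omega

-- ===== VERDICT (by name: the statement is the Claim_ definition above) =====
theorem player_analysis_frequency_spec : Claim_equal_player_analysis_frequency := by
  intro stats _
  unfold Spec_player_analysis_frequency player_analysis_frequency
  have hA := pvFoldA_pvD stats 0 0 0 0 0 0 0
  simp only [zero_add] at hA
  rw [show pvFreqA = pvD 0 0 0 0 0 0 0 by (unfold pvFreqA pvD); rfl, hA, pvAltItems]
  have hlt := pvCountP_lt_five stats
  have h1 := pvCountP_split stats 5 10 (by omega)
  have h2 := pvCountP_split stats 10 15 (by omega)
  have h3 := pvCountP_split stats 15 20 (by omega)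
  have h4 := pvCountP_split stats 20 25 (by omega)
  have h5 := pvCountP_split stats 25 30 (by omega)
  rw [pvD_items]
  simp only [pvGeq_eq, List.cons.injEq, Prod.mk.injEq, true_and, and_true]
  refine ⟨?_, ?_, ?_, ?_, ?_, ?_⟩ <;> omega
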